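-- pv_equiv track=rewrite | github.com/rpplayground/CS814 | practical1_miu_part5/JL's MIU code.py | JL_next_string
-- ===== SOURCE A (Python) =====
-- def JL_next_string(string):
--     result = ''
--     carry = 1
--     for i in range(len(string) - 1, -1, -1):
--         if carry == 0:
--             result = string[i] + result
--         if string[i] == 'I' and carry == 1:
--             result = 'U' + result
--             carry = 0
--         if string[i] == 'U' and carry == 1:
--             result = 'I' + result
--         if string[i] == 'M' and carry == 1:
--             result = 'MI' + result
--     return result
-- ===== SOURCE B (Python) =====
-- def JL_next_string(string):
--     head, sep, tail = string.rpartition('I')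
--     mapped = ''.join('I' if c == 'U' else 'MI' if c == 'M' else '' for c in tail)
--     return head + 'U' + mapped if sep else mapped
-- ===== Notes on version B (the rewrite author's own statement) =====
-- stated objective: simpler
-- what changed: Replaces A's right-to-left carry loop with rpartition at the rightmost 'I': the prefix is copied verbatim, that character becomes 'U', and only the suffix is mapped by a single join of a comprehension (U->I, M->MI, other characters dropped).
import Mathlib
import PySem

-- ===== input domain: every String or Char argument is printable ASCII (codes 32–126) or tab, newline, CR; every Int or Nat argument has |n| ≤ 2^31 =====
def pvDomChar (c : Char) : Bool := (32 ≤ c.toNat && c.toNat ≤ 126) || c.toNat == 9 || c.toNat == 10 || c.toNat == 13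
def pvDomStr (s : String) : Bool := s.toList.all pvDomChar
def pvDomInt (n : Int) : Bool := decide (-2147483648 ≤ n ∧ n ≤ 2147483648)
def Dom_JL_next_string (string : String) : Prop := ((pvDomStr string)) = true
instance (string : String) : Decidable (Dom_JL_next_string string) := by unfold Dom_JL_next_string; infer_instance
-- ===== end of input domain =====

-- B replaces A's right-to-left carry loop by rpartition at the rightmost 'I' plus a single
-- suffix map (U→I, M→MI, others dropped); objective: simpler, same O(n) cost.

-- ===== PORT A =====
-- one iteration of A's loop body (result, carry) over string[i], branches in A's order
def stepA (st : List Char × Int) (c : Char) : List Char × Int :=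
  let result := if st.2 == 0 then c :: st.1 else st.1
  let rc := if c == 'I' && st.2 == 1 then ('U' :: result, (0 : Int)) else (result, st.2)
  let result := if c == 'U' && rc.2 == 1 then 'I' :: rc.1 else rc.1
  let result := if c == 'M' && rc.2 == 1 then 'M' :: 'I' :: result else result
  (result, rc.2)

-- A: for i in range(len-1, -1, -1) reads the characters right-to-left = fold over the reversed list
def JL_next_string (string : String) : String :=
  (string.toList.reverse.foldl stepA ([], 1)).1.asString

-- ===== PORT B =====
-- the generator expression's per-character output: 'I' if c=='U' else 'MI' if c=='M' else ''
def mapChar (c : Char) : List Char :=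
  if c = 'U' then ['I'] else if c = 'M' then ['M', 'I'] else []

-- ''.join(mapChar(c) for c in l)
def mapSuffix (l : List Char) : List Char := l.flatMap mapChar

-- Source B's string.rpartition('I'): the rightmost 'I' is found as the first 'I' of the reversed
-- list (exact for a single-character separator); none = sep == '' (no 'I' in the string)
def JL_next_string_alt (string : String) : String :=
  match string.toList.reverse.idxOf? 'I' with
  | none => (mapSuffix string.toList).asString
  | some k =>
    (string.toList.take (string.toList.length - 1 - k) ++
      'U' :: mapSuffix (string.toList.drop (string.toList.length - k))).asString

-- ===== PRECONDITION & SPEC =====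
def Spec_JL_next_string (string : String) (out : String) : Prop := out = JL_next_string_alt string
instance (string : String) (out : String) : Decidable (Spec_JL_next_string string out) := by unfold Spec_JL_next_string; infer_instance

-- ===== CLAIM (what is proved, stated in full; the proofs are below) =====
def Claim_equal_JL_next_string : Prop := ∀ (string : String), Dom_JL_next_string string → Spec_JL_next_string string (JL_next_string string)

-- ===== LEMMAS AND PROOFS =====

-- once carry = 0, A's loop just copies the remaining characters in front of the accumulator
theorem foldA_carry0 (r acc : List Char) :
    r.foldl stepA (acc, 0) = (r.reverse ++ acc, 0) := by
  induction r generalizing acc with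
  | nil => simp
  | cons c r ih => simp [stepA, ih]

-- with carry = 1, a non-'I' character contributes exactly mapChar c
theorem stepA_carry1 (acc : List Char) (c : Char) (h : c ≠ 'I') :
    stepA (acc, 1) c = (mapChar c ++ acc, 1) := by
  simp only [stepA, mapChar]
  split_ifs with h1 h2 h3 h4 h5 <;> simp_all

theorem foldA_none (r : List Char) (acc : List Char) (h : r.idxOf? 'I' = none) :
    r.foldl stepA (acc, 1) = (mapSuffix r.reverse ++ acc, 1) := by
  induction r generalizing acc with
  | nil => simp [mapSuffix]
  | cons c r ih =>
    rw [List.idxOf?, List.findIdx?_cons] at h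
    split at h
    · exact absurd h (by simp)
    · have hc : c ≠ 'I' := by
        rename_i hf; intro he; subst he; simp at hf
      have h' : r.idxOf? 'I' = none := by
        rw [List.idxOf?]; cases hf : List.findIdx? (fun x => x == 'I') r <;> simp_all
      simp only [List.foldl_cons, stepA_carry1 acc c hc, ih _ h']
      simp [mapSuffix, List.flatMap_append]

theorem foldA_some (r : List Char) (acc : List Char) (k : Nat) (h : r.idxOf? 'I' = some k) :
    r.foldl stepA (acc, 1) =
      ((r.drop (k + 1)).reverse ++ 'U' :: (mapSuffix (r.take k).reverse ++ acc), 0) := by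
  induction r generalizing acc k with
  | nil => simp [List.idxOf?] at h
  | cons c r ih =>
    rw [List.idxOf?, List.findIdx?_cons] at h
    split at h
    · -- c = 'I'
      rename_i hf
      have hc : c = 'I' := by simpa using hf
      have hk : k = 0 := by simp at h; omega
      subst hc hk
      simp only [List.foldl_cons]
      have : stepA (acc, 1) 'I' = ('U' :: acc, 0) := by simp [stepA]
      rw [this, foldA_carry0]
      simp [mapSuffix]
    · rename_i hf
      have hc : c ≠ 'I' := by intro he; subst he; simp at hf
      have h' : ∃ k', r.idxOf? 'I' = some k' ∧ k = k' + 1 := by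
        rw [List.idxOf?]
        cases hfx : List.findIdx? (fun x => x == 'I') r with
        | none => rw [hfx] at h; simp at h
        | some k2 => rw [hfx] at h; simp at h; exact ⟨k2, rfl, by omega⟩
      obtain ⟨k', hk', rfl⟩ := h'
      simp only [List.foldl_cons, stepA_carry1 acc c hc, ih _ _ hk']
      simp [mapSuffix, List.flatMap_append]

-- ===== VERDICT (by name: the statement is the Claim_ definition above) =====
theorem JL_next_string_spec : Claim_equal_JL_next_string := by
  intro s _
  unfold Spec_JL_next_string JL_next_string JL_next_string_alt
  cases h : s.toList.reverse.idxOf? 'I' with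
  | none =>
    rw [foldA_none _ _ h]
    simp
  | some k =>
    rw [foldA_some _ _ _ h]
    simp only [List.reverse_drop, List.reverse_take, List.reverse_reverse, List.length_reverse,
      List.append_nil]
    have h1 : s.toList.length - (k + 1) = s.toList.length - 1 - k := by omega
    rw [h1]
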